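-- pv_equiv track=rewrite | github.com/melindakim16/Tactiread_webapp | app.py | _rasterize_path
-- ===== SOURCE A (Python) =====
-- from typing import List, Tuple, Dict, Optional
--
-- def _bresenham_line(x0: int, y0: int, x1: int, y1: int) -> List[Tuple[int, int]]:
--     points: List[Tuple[int, int]] = []
--     dx = abs(x1 - x0)
--     dy = -abs(y1 - y0)
--     sx = 1 if x0 < x1 else -1
--     sy = 1 if y0 < y1 else -1
--     err = dx + dy
--     x, y = x0, y0
--     while True:
--         points.append((x, y))
--         if x == x1 and y == y1:
--             break
--         e2 = 2 * err
--         if e2 >= dy: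
--             err += dy
--             x += sx
--         if e2 <= dx:
--             err += dx
--             y += sy
--     return points
--
-- def _rasterize_path(gx: List[Optional[int]], gy: List[Optional[int]]) -> List[Dict[str, int]]:
--     path: List[Dict[str, int]] = []
--     prev: Optional[Tuple[int,int]] = None
--
--     i = 0
--     n = len(gx)
--     while i < n:
--         while i < n and (gx[i] is None or gy[i] is None):
--             prev = None
--             i += 1
--         if i >= n:
--             break
--
--         start = (gx[i], gy[i])
--         if prev != start:
--             path.append({"x": start[0], "y": start[1], "pen": 0})
--             prev = start
--         i += 1
--
--         while i < n and gx[i] is not None and gy[i] is not None: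
--             p = (gx[i], gy[i])
--             if p != prev:
--                 for (cx, cy) in _bresenham_line(prev[0], prev[1], p[0], p[1]):
--                     if path and path[-1]["x"] == cx and path[-1]["y"] == cy:
--                         continue
--                     path.append({"x": cx, "y": cy, "pen": 1})
--                 prev = p
--             i += 1
--
--     return path
-- ===== SOURCE B (Python) =====
-- from typing import List, Tuple, Dict, Optional
--
-- def _bresenham_line(x0: int, y0: int, x1: int, y1: int) -> List[Tuple[int, int]]:
--     points: List[Tuple[int, int]] = []
--     dx = abs(x1 - x0)
--     dy = -abs(y1 - y0)
--     sx = 1 if x0 < x1 else -1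
--     sy = 1 if y0 < y1 else -1
--     err = dx + dy
--     x, y = x0, y0
--     while True:
--         points.append((x, y))
--         if x == x1 and y == y1:
--             break
--         e2 = 2 * err
--         if e2 >= dy:
--             err += dy
--             x += sx
--         if e2 <= dx:
--             err += dx
--             y += sy
--     return points
--
-- def _rasterize_path(gx: List[Optional[int]], gy: List[Optional[int]]) -> List[Dict[str, int]]:
--     # Pass 1: split positions into maximal runs where both coordinates are present.
--     segments: List[List[Tuple[int, int]]] = []
--     current: List[Tuple[int, int]] = []
--     for i in range(len(gx)):
--         if gx[i] is None or gy[i] is None: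
--             if current:
--                 segments.append(current)
--                 current = []
--         else:
--             current.append((gx[i], gy[i]))
--     if current:
--         segments.append(current)
--
--     # Pass 2: render each segment: first point pen-up, then Bresenham pixels pen-down.
--     path: List[Dict[str, int]] = []
--     for seg in segments:
--         prev = seg[0]
--         path.append({"x": prev[0], "y": prev[1], "pen": 0})
--         for p in seg[1:]:
--             if p == prev:
--                 continue
--             for (cx, cy) in _bresenham_line(prev[0], prev[1], p[0], p[1]):
--                 last = path[-1]
--                 if last["x"] == cx and last["y"] == cy:
--                     continue
--                 path.append({"x": cx, "y": cy, "pen": 1})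
--             prev = p
--     return path
-- ===== Notes on version B (the rewrite author's own statement) =====
-- stated objective: alternative
-- what changed: B replaces A's single pass of nested index-chasing while loops (skip-gap loop, start handling, draw loop sharing one cursor and a carried prev sentinel) with two passes: first build the explicit list of maximal runs of present (x,y) pairs, then render each run independently (pen-0 first point, Bresenham pen-1 pixels).
import Mathlib
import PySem

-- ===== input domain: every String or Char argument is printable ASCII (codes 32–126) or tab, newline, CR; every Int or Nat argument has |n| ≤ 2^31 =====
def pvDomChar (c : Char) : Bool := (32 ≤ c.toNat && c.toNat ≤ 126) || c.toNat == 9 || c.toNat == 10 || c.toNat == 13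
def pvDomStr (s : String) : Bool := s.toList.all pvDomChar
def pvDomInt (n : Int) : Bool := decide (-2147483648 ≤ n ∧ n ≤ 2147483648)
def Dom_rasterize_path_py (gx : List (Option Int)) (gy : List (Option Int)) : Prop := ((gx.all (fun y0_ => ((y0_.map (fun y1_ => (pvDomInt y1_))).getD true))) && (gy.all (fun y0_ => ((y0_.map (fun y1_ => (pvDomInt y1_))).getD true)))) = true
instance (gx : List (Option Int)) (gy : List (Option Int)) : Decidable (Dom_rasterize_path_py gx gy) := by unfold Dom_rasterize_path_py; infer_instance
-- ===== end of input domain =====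

-- B rasterizes in two passes (build maximal present-runs, then render each run) instead of A's
-- nested index-chasing while loops; objective: alternative decomposition, same cost.

-- ===== PORT A =====
-- {"x": x, "y": y, "pen": pen} as an insertion-ordered association list
def pvPoint (x y pen : Int) : List (String × Int) := [("x", x), ("y", y), ("pen", pen)]

-- d[k] for the point dicts above (exact: every dict built here contains the key, so no KeyError)
def pvLook (d : List (String × Int)) (k : String) : Int := (d.lookup k).getD 0

-- the shared inline snippet `if path and path[-1]["x"] == cx and path[-1]["y"] == cy: continue; path.append(...)`
def pvEmit (path : List (List (String × Int))) (c : Int × Int) : List (List (String × Int)) :=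
  match path.getLast? with
  | some lastd =>
      if pvLook lastd "x" = c.1 ∧ pvLook lastd "y" = c.2 then path
      else path ++ [pvPoint c.1 c.2 1]
  | none => path ++ [pvPoint c.1 c.2 1]

-- _bresenham_line's `while True` loop; fuel dx+|dy|+1 bounds its iteration count (each pass
-- before the last moves x or y one step toward the target)
def bres_go (x1 y1 sx sy dx dy : Int) : Nat → Int → Int → Int → List (Int × Int)
  | 0, _, _, _ => []
  | Nat.succ fuel, err, x, y =>
    (x, y) ::
    (if x = x1 ∧ y = y1 then []
     else
       bres_go x1 y1 sx sy dx dy fuel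
         ((if 2 * err ≥ dy then err + dy else err) + (if 2 * err ≤ dx then dx else 0))
         (if 2 * err ≥ dy then x + sx else x)
         (if 2 * err ≤ dx then y + sy else y))

-- _bresenham_line (helper of both A and B, exactly as in both Python files)
def bresenham_line (x0 y0 x1 y1 : Int) : List (Int × Int) :=
  bres_go x1 y1 (if x0 < x1 then 1 else -1) (if y0 < y1 then 1 else -1)
    |x1 - x0| (-|y1 - y0|)
    (|x1 - x0| + |y1 - y0| + 1).toNat (|x1 - x0| + (-|y1 - y0|)) x0 y0

-- inner `while i < n and (gx[i] is None or gy[i] is None): prev = None; i += 1`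
def rpA_skip (gx gy : List (Option Int)) (n i : Nat) (prev : Option (Int × Int)) :
    Nat × Option (Int × Int) :=
  if h : i < n ∧ (gx.getD i none = none ∨ gy.getD i none = none) then
    rpA_skip gx gy n (i + 1) none
  else (i, prev)
termination_by n - i
decreasing_by exact Nat.sub_succ_lt_self n i h.1

lemma rpA_skip_le (gx gy : List (Option Int)) (n i : Nat) (prev : Option (Int × Int)) :
    i ≤ (rpA_skip gx gy n i prev).1 := by
  fun_induction rpA_skip gx gy n i prev
  case case1 i prev h ih => exact Nat.le_of_succ_le ih
  case case2 i prev h => exact Nat.le_refl i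

-- inner `while i < n and gx[i] is not None and gy[i] is not None: …` (the drawing loop)
def rpA_draw (gx gy : List (Option Int)) (n i : Nat) (prev : Int × Int)
    (path : List (List (String × Int))) :
    Nat × (Int × Int) × List (List (String × Int)) :=
  if h : i < n ∧ gx.getD i none ≠ none ∧ gy.getD i none ≠ none then
    if ((gx.getD i none).getD 0, (gy.getD i none).getD 0) ≠ prev then
      rpA_draw gx gy n (i + 1) ((gx.getD i none).getD 0, (gy.getD i none).getD 0)
        ((bresenham_line prev.1 prev.2 ((gx.getD i none).getD 0) ((gy.getD i none).getD 0)).foldl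
          pvEmit path)
    else rpA_draw gx gy n (i + 1) prev path
  else (i, prev, path)
termination_by n - i
decreasing_by all_goals exact Nat.sub_succ_lt_self n i h.1

lemma rpA_draw_le (gx gy : List (Option Int)) (n i : Nat) (prev : Int × Int)
    (path : List (List (String × Int))) : i ≤ (rpA_draw gx gy n i prev path).1 := by
  fun_induction rpA_draw gx gy n i prev path
  case case1 i prev path h hne ih => exact Nat.le_of_succ_le ih
  case case2 i prev path h hne ih => exact Nat.le_of_succ_le ih
  case case3 i prev path h => exact Nat.le_refl i

-- one outer-loop body after the skip loop landed at j: `start = …; if prev != start: append pen 0; i += 1; <draw loop>`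
def rpA_body (gx gy : List (Option Int)) (n j : Nat) (sprev : Option (Int × Int))
    (path : List (List (String × Int))) :
    Nat × (Int × Int) × List (List (String × Int)) :=
  rpA_draw gx gy n (j + 1) ((gx.getD j none).getD 0, (gy.getD j none).getD 0)
    (if sprev ≠ some ((gx.getD j none).getD 0, (gy.getD j none).getD 0) then
        path ++ [pvPoint ((gx.getD j none).getD 0) ((gy.getD j none).getD 0) 0]
      else path)

lemma rpA_body_lt (gx gy : List (Option Int)) (n j : Nat) (sprev : Option (Int × Int))
    (path : List (List (String × Int))) : j < (rpA_body gx gy n j sprev path).1 := by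
  have h := rpA_draw_le gx gy n (j + 1)
    ((gx.getD j none).getD 0, (gy.getD j none).getD 0)
    (if sprev ≠ some ((gx.getD j none).getD 0, (gy.getD j none).getD 0) then
        path ++ [pvPoint ((gx.getD j none).getD 0) ((gy.getD j none).getD 0) 0]
      else path)
  exact Nat.lt_of_succ_le h

-- the outer `while i < n` loop
def rpA_outer (gx gy : List (Option Int)) (n i : Nat) (prev : Option (Int × Int))
    (path : List (List (String × Int))) : List (List (String × Int)) :=
  if _h : i < n then
    if _h2 : (rpA_skip gx gy n i prev).1 < n then
      rpA_outer gx gy n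
        (rpA_body gx gy n (rpA_skip gx gy n i prev).1 (rpA_skip gx gy n i prev).2 path).1
        (some (rpA_body gx gy n (rpA_skip gx gy n i prev).1 (rpA_skip gx gy n i prev).2 path).2.1)
        (rpA_body gx gy n (rpA_skip gx gy n i prev).1 (rpA_skip gx gy n i prev).2 path).2.2
    else path
  else path
termination_by n - i
decreasing_by
  exact Nat.sub_lt_sub_left _h
    (Nat.lt_of_le_of_lt (rpA_skip_le gx gy n i prev)
      (rpA_body_lt gx gy n (rpA_skip gx gy n i prev).1 (rpA_skip gx gy n i prev).2 path))

def rasterize_path_py (gx : List (Option Int)) (gy : List (Option Int)) :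
    List (List (String × Int)) :=
  rpA_outer gx gy gx.length 0 none []

-- ===== PORT B =====
-- pass 1 folding step: split indices into maximal runs of present (x, y) pairs
def rpB_scan (gx gy : List (Option Int))
    (st : List (List (Int × Int)) × List (Int × Int)) (i : Nat) :
    List (List (Int × Int)) × List (Int × Int) :=
  if gx.getD i none = none ∨ gy.getD i none = none then
    (if st.2 ≠ [] then st.1 ++ [st.2] else st.1, [])
  else (st.1, st.2 ++ [((gx.getD i none).getD 0, (gy.getD i none).getD 0)])

def rpB_segments (gx gy : List (Option Int)) : List (List (Int × Int)) :=
  -- final flush: `if current: segments.append(current)`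
  if ((List.range gx.length).foldl (rpB_scan gx gy) ([], [])).2 ≠ [] then
    ((List.range gx.length).foldl (rpB_scan gx gy) ([], [])).1 ++
      [((List.range gx.length).foldl (rpB_scan gx gy) ([], [])).2]
  else ((List.range gx.length).foldl (rpB_scan gx gy) ([], [])).1

-- pass 2 inner step: `if p == prev: continue` else draw the Bresenham pixels
def rpB_step (st : (Int × Int) × List (List (String × Int))) (p : Int × Int) :
    (Int × Int) × List (List (String × Int)) :=
  if p = st.1 then st
  else (p, (bresenham_line st.1.1 st.1.2 p.1 p.2).foldl pvEmit st.2)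

-- render one segment: first point pen 0, then pixels pen 1
def rpB_seg (path : List (List (String × Int))) (seg : List (Int × Int)) :
    List (List (String × Int)) :=
  match seg with
  | [] => path  -- unreachable: rpB_segments only produces non-empty runs
  | p0 :: rest => (rest.foldl rpB_step (p0, path ++ [pvPoint p0.1 p0.2 0])).2

def rasterize_path_py_alt (gx : List (Option Int)) (gy : List (Option Int)) :
    List (List (String × Int)) :=
  (rpB_segments gx gy).foldl rpB_seg []

-- ===== PRECONDITION & SPEC =====
-- Pre_ excludes exactly the inputs on which Python A raises IndexError: a position i with
-- gx[i] not None but i ≥ len(gy) (short-circuiting skips gy[i] when gx[i] is None).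
def Pre_rasterize_path_py (gx : List (Option Int)) (gy : List (Option Int)) : Prop :=
  ∀ i : Nat, i < gx.length → gx.getD i none ≠ none → i < gy.length
instance (gx : List (Option Int)) (gy : List (Option Int)) :
    Decidable (Pre_rasterize_path_py gx gy) := by unfold Pre_rasterize_path_py; infer_instance

def pvWitness_rasterize_path_py : List (Option Int) × List (Option Int) :=
  ([some 0, some 2, none, some 1], [some 0, some 0, none, some 1])

def Spec_rasterize_path_py (gx : List (Option Int)) (gy : List (Option Int))
    (out : List (List (String × Int))) : Prop := out = rasterize_path_py_alt gx gy
instance (gx : List (Option Int)) (gy : List (Option Int)) (out : List (List (String × Int))) :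
    Decidable (Spec_rasterize_path_py gx gy out) := by unfold Spec_rasterize_path_py; infer_instance

-- ===== CLAIM (what is proved, stated in full; the proofs are below) =====
def Claim_equal_rasterize_path_py : Prop := ∀ (gx : List (Option Int)) (gy : List (Option Int)), Dom_rasterize_path_py gx gy → Pre_rasterize_path_py gx gy → Spec_rasterize_path_py gx gy (rasterize_path_py gx gy)

-- ===== LEMMAS AND PROOFS =====

-- ghost: the maximal run of present pairs starting at i, and the index just after it
def runA (gx gy : List (Option Int)) (n i : Nat) : List (Int × Int) × Nat :=
  if h : i < n ∧ gx.getD i none ≠ none ∧ gy.getD i none ≠ none then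
    (((gx.getD i none).getD 0, (gy.getD i none).getD 0) :: (runA gx gy n (i + 1)).1,
      (runA gx gy n (i + 1)).2)
  else ([], i)
termination_by n - i
decreasing_by omega

lemma runA_le (gx gy : List (Option Int)) (n i : Nat) : i ≤ (runA gx gy n i).2 := by
  fun_induction runA gx gy n i
  case case1 i h ih => simp only []; omega
  case case2 i h => simp

-- ghost: the list of maximal present-runs from index i on, in A's skip/run shape
def segsA (gx gy : List (Option Int)) (n i : Nat) : List (List (Int × Int)) :=
  if _h : i < n then
    if h2 : (rpA_skip gx gy n i none).1 < n then
      (((gx.getD (rpA_skip gx gy n i none).1 none).getD 0,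
          (gy.getD (rpA_skip gx gy n i none).1 none).getD 0)
        :: (runA gx gy n ((rpA_skip gx gy n i none).1 + 1)).1)
      :: segsA gx gy n (runA gx gy n ((rpA_skip gx gy n i none).1 + 1)).2
    else []
  else []
termination_by n - i
decreasing_by
  have h3 := rpA_skip_le gx gy n i none
  have h4 := runA_le gx gy n ((rpA_skip gx gy n i none).1 + 1)
  omega

lemma runA_post (gx gy : List (Option Int)) (n i : Nat) :
    ¬ ((runA gx gy n i).2 < n ∧ gx.getD (runA gx gy n i).2 none ≠ none ∧
        gy.getD (runA gx gy n i).2 none ≠ none) := by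
  fun_induction runA gx gy n i
  case case1 i h ih => simpa using ih
  case case2 i h => simpa using h

lemma rpA_skip_cases (gx gy : List (Option Int)) (n i : Nat) (prev : Option (Int × Int)) :
    (rpA_skip gx gy n i prev).2 = none ∨
      (¬ (i < n ∧ (gx.getD i none = none ∨ gy.getD i none = none)) ∧
        rpA_skip gx gy n i prev = (i, prev)) := by
  fun_induction rpA_skip gx gy n i prev
  case case1 i prev h ih =>
    left
    rcases ih with h1 | ⟨_, h2⟩
    · exact h1
    · rw [h2]
  case case2 i prev h => exact Or.inr ⟨h, rfl⟩

lemma rpA_skip_fst_indep (gx gy : List (Option Int)) (n i : Nat) (prev : Option (Int × Int)) :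
    (rpA_skip gx gy n i prev).1 = (rpA_skip gx gy n i none).1 := by
  fun_induction rpA_skip gx gy n i prev
  case case1 i prev h ih =>
    conv_rhs => rw [rpA_skip, dif_pos h]
  case case2 i prev h =>
    conv_rhs => rw [rpA_skip, dif_neg h]

-- the drawing loop is the fold of rpB_step over the run starting at i
lemma rpA_draw_run (gx gy : List (Option Int)) (n i : Nat) (prev : Int × Int)
    (path : List (List (String × Int))) :
    rpA_draw gx gy n i prev path =
      ((runA gx gy n i).2, (runA gx gy n i).1.foldl rpB_step (prev, path)) := by
  fun_induction rpA_draw gx gy n i prev path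
  case case1 i prev path h hne ih =>
    conv_rhs => rw [runA]
    rw [dif_pos h]
    simp only [List.foldl_cons]
    rw [rpB_step]
    simp only [if_neg hne]
    exact ih
  case case2 i prev path h heq ih =>
    conv_rhs => rw [runA]
    rw [dif_pos h]
    simp only [List.foldl_cons]
    simp only [not_not] at heq
    rw [rpB_step]
    simp only [if_pos heq]
    exact ih
  case case3 i prev path h =>
    rw [runA, dif_neg h]
    simp

-- the outer loop renders exactly the segments from i (prev is none whenever i sits on a gap)
lemma rpA_outer_fold (gx gy : List (Option Int)) (n i : Nat) (prev : Option (Int × Int))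
    (path : List (List (String × Int)))
    (hinv : prev = none ∨ ¬ i < n ∨ gx.getD i none = none ∨ gy.getD i none = none) :
    rpA_outer gx gy n i prev path = (segsA gx gy n i).foldl rpB_seg path := by
  fun_induction rpA_outer gx gy n i prev path with
  | case1 i prev path h h2 ih =>
      -- skip's carried prev is none here
      have hs2 : (rpA_skip gx gy n i prev).2 = none := by
        rcases rpA_skip_cases gx gy n i prev with h1 | ⟨hnc, heq⟩
        · exact h1
        · rcases hinv with rfl | hni | hgx | hgy
          · rw [heq]
          · exact absurd h hni
          · exact absurd ⟨h, Or.inl hgx⟩ hnc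
          · exact absurd ⟨h, Or.inr hgy⟩ hnc
      rw [segsA]
      have h2' : (rpA_skip gx gy n i none).1 < n := by
        rwa [rpA_skip_fst_indep gx gy n i prev] at h2
      simp only [h, dif_pos, h2', dif_pos]
      rw [List.foldl_cons]
      -- unfold the body into runA's fold
      rw [rpA_body] at *
      set j := (rpA_skip gx gy n i prev).1 with hj
      have hjj : (rpA_skip gx gy n i none).1 = j := (rpA_skip_fst_indep gx gy n i prev).symm
      rw [hjj]
      rw [hs2] at *
      have hpath : (if (none : Option (Int × Int)) ≠
          some ((gx.getD j none).getD 0, (gy.getD j none).getD 0) then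
            path ++ [pvPoint ((gx.getD j none).getD 0) ((gy.getD j none).getD 0) 0]
          else path) =
          path ++ [pvPoint ((gx.getD j none).getD 0) ((gy.getD j none).getD 0) 0] := by
        simp
      rw [hpath] at ih ⊢
      rw [rpA_draw_run] at ih ⊢
      simp only at ih ⊢
      rw [rpB_seg]
      have hrec := ih (by
        have := runA_post gx gy n (j + 1)
        by_cases hlt : (runA gx gy n (j + 1)).2 < n
        · right; right
          by_cases hx : gx.getD (runA gx gy n (j + 1)).2 none = none
          · exact Or.inl hx
          · right
            by_cases hy : gy.getD (runA gx gy n (j + 1)).2 none = none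
            · exact hy
            · exact absurd ⟨hlt, hx, hy⟩ this
        · right; left; exact hlt)
      rw [hrec]
  | case2 i prev path h h2 =>
      rw [segsA]
      have h2' : ¬ (rpA_skip gx gy n i none).1 < n := by
        rwa [rpA_skip_fst_indep gx gy n i prev] at h2
      simp [h, h2']
  | case3 i prev path h =>
      rw [segsA]
      simp [h]

-- segsA absorbs a leading gap position
lemma segsA_none_step (gx gy : List (Option Int)) (n i : Nat) (h : i < n)
    (hc : gx.getD i none = none ∨ gy.getD i none = none) :
    segsA gx gy n i = segsA gx gy n (i + 1) := by
  have hskip : rpA_skip gx gy n i none = rpA_skip gx gy n (i + 1) none := by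
    rw [rpA_skip, dif_pos ⟨h, hc⟩]
  by_cases h1 : i + 1 < n
  · conv_lhs => rw [segsA]
    rw [dif_pos h, hskip]
    conv_rhs => rw [segsA]
    rw [dif_pos h1]
  · have hsk : rpA_skip gx gy n (i + 1) none = (i + 1, none) := by
      rw [rpA_skip, dif_neg (fun hh => h1 hh.1)]
    conv_lhs => rw [segsA]
    rw [dif_pos h, hskip, hsk]
    conv_rhs => rw [segsA]
    rw [dif_neg h1]
    simp [h1]

-- runA unfolding at a present position
lemma runA_cons (gx gy : List (Option Int)) (n i : Nat) (h : i < n)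
    (hx : gx.getD i none ≠ none) (hy : gy.getD i none ≠ none) :
    runA gx gy n i =
      (((gx.getD i none).getD 0, (gy.getD i none).getD 0) :: (runA gx gy n (i + 1)).1,
        (runA gx gy n (i + 1)).2) := by
  rw [runA, dif_pos ⟨h, hx, hy⟩]

-- segsA unfolding at a present position
lemma segsA_cons (gx gy : List (Option Int)) (n i : Nat) (h : i < n)
    (hx : gx.getD i none ≠ none) (hy : gy.getD i none ≠ none) :
    segsA gx gy n i =
      (((gx.getD i none).getD 0, (gy.getD i none).getD 0) :: (runA gx gy n (i + 1)).1)
        :: segsA gx gy n (runA gx gy n (i + 1)).2 := by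
  have hsk : rpA_skip gx gy n i none = (i, none) := by
    rw [rpA_skip, dif_neg (fun hh => hh.2.elim hx hy)]
  conv_lhs => rw [segsA]
  rw [dif_pos h]
  simp only [hsk]
  rw [dif_pos h]

-- pass 1 invariant: folding rpB_scan over [i, i+k) then flushing yields segs ++ the runs from i
-- (glued onto a pending partial run cur)
lemma rpB_scan_inv (gx gy : List (Option Int)) (n : Nat) :
    ∀ (k i : Nat) (segs : List (List (Int × Int))) (cur : List (Int × Int)), i + k = n →
      (if ((List.range' i k).foldl (rpB_scan gx gy) (segs, cur)).2 ≠ [] then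
          ((List.range' i k).foldl (rpB_scan gx gy) (segs, cur)).1 ++
            [((List.range' i k).foldl (rpB_scan gx gy) (segs, cur)).2]
        else ((List.range' i k).foldl (rpB_scan gx gy) (segs, cur)).1) =
      segs ++ (if cur = [] then segsA gx gy n i
        else (cur ++ (runA gx gy n i).1) :: segsA gx gy n (runA gx gy n i).2) := by
  intro k
  induction k with
  | zero =>
      intro i segs cur hik
      have hin : ¬ i < n := by omega
      have hr : runA gx gy n i = ([], i) := by
        rw [runA, dif_neg (fun hh => hin hh.1)]
      have hs : segsA gx gy n i = [] := by rw [segsA, dif_neg hin]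
      by_cases hc : cur = []
      · simp [hc, hs]
      · simp [hc, hr, hs]
  | succ k ih =>
      intro i segs cur hik
      have hi : i < n := by omega
      rw [List.range'_succ, List.foldl_cons]
      by_cases hcnd : gx.getD i none = none ∨ gy.getD i none = none
      · have hstep : rpB_scan gx gy (segs, cur) i =
            (if cur ≠ [] then segs ++ [cur] else segs, []) := by
          rw [rpB_scan, if_pos hcnd]
        rw [hstep, ih (i + 1) _ _ (by omega)]
        have habs := segsA_none_step gx gy n i hi hcnd
        have hr : runA gx gy n i = ([], i) := by
          rw [runA, dif_neg (fun hh => hcnd.elim (fun hx => hh.2.1 hx) (fun hy => hh.2.2 hy))]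
        by_cases hcur : cur = []
        · simp [hcur, habs]
        · simp [hcur, hr, habs]
      · obtain ⟨hx, hy⟩ := not_or.mp hcnd
        have hstep : rpB_scan gx gy (segs, cur) i =
            (segs, cur ++ [((gx.getD i none).getD 0, (gy.getD i none).getD 0)]) := by
          rw [rpB_scan, if_neg (fun hh => hh.elim hx hy)]
        rw [hstep, ih (i + 1) _ _ (by omega)]
        rw [if_neg (by simp)]
        rw [runA_cons gx gy n i hi hx hy]
        by_cases hcur : cur = []
        · rw [segsA_cons gx gy n i hi hx hy]
          simp [hcur]
        · simp [hcur]

-- pass 1 computes segsA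
lemma rpB_segments_eq (gx gy : List (Option Int)) :
    rpB_segments gx gy = segsA gx gy gx.length 0 := by
  have h := rpB_scan_inv gx gy gx.length gx.length 0
    ([] : List (List (Int × Int))) ([] : List (Int × Int)) (by omega)
  rw [rpB_segments, List.range_eq_range']
  simpa using h

-- ===== VERDICT (by name: the statement is the Claim_ definition above) =====
theorem rasterize_path_py_spec : Claim_equal_rasterize_path_py := by
  intro gx gy _ _
  unfold Spec_rasterize_path_py
  rw [rasterize_path_py, rasterize_path_py_alt, rpB_segments_eq]
  exact rpA_outer_fold gx gy gx.length 0 none [] (Or.inl rfl)
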